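-- pv_equiv track=rewrite | github.com/iambeno1/2024-Codewars-Coding-Challenge | My Solutions/098_Change two-dimensional array.py | matrix1
-- ===== SOURCE A (Python) =====
-- def matrix1(array):
--     # Create a new array to store the modified values
--     result = []
--
--     # Iterate over each row of the input array
--     for i in range(len(array)):
--         row = []
--         # Iterate over each element in the current row
--         for j in range(len(array[i])):
--             # Check if the element is on the main diagonal
--             if i == j:
--                 # Change negative integers to 0, otherwise to 1
--                 if array[i][j] < 0:
--                     row.append(0)
--                 else:
--                     row.append(1)
--             else:
--                 # Keep the original value
--                 row.append(array[i][j])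
--         # Append the modified row to the result array
--         result.append(row)
--
--     return result
-- ===== SOURCE B (Python) =====
-- def matrix1(array):
--     # Recursive first-row/first-column peeling: fix the top-left cell, recurse on the
--     # remaining rows with their first column stripped (the diagonal shifts with it),
--     # then re-attach the stripped first elements.
--     if not array:
--         return []
--     first, rest = array[0], array[1:]
--     fixed = ([0 if first[0] < 0 else 1] + first[1:]) if first else []
--     sub = matrix1([r[1:] for r in rest])
--     return [fixed] + [([r[0]] if r else []) + s for r, s in zip(rest, sub)]
-- ===== Notes on version B (the rewrite author's own statement) =====
-- stated objective: alternative
-- what changed: Replaces A's nested index loops with a structural recursion that peels off the first row and first column each step (fix the top-left cell, recurse on the column-stripped tail where the diagonal shifts to position 0, re-attach the stripped first elements).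
import Mathlib
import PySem

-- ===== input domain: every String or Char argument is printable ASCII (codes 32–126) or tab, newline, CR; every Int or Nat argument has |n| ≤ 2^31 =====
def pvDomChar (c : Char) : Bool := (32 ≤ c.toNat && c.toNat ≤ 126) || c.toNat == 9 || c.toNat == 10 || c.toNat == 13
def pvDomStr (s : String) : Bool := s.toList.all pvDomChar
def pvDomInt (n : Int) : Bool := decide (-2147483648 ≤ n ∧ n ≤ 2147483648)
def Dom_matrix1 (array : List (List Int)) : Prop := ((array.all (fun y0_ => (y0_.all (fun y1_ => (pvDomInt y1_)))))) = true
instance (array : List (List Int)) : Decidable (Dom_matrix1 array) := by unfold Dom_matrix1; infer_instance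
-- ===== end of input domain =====

-- B replaces A's nested index loops by a structural recursion peeling the first row and
-- first column each step (different algorithm, same result; no speed claim).

-- ===== PORT A =====
-- inner loop: for j in range(len(array[i])), building `row` element by element
def matrix1Row (i j : Nat) (r : List Int) : List Int :=
  match r with
  | [] => []
  | x :: xs => (if i == j then (if x < 0 then (0 : Int) else 1) else x) :: matrix1Row i (j + 1) xs

-- outer loop: for i in range(len(array)), appending each rebuilt row
def matrix1Go (i : Nat) (rows : List (List Int)) : List (List Int) :=
  match rows with
  | [] => []
  | r :: rs => matrix1Row i 0 r :: matrix1Go (i + 1) rs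

def matrix1 (array : List (List Int)) : List (List Int) := matrix1Go 0 array

-- ===== PORT B =====
def matrix1_alt (array : List (List Int)) : List (List Int) :=
  match array with
  | [] => []
  | first :: rest =>
    let fixed : List Int :=
      match first with
      | [] => []
      | x :: xs => (if x < 0 then (0 : Int) else 1) :: xs
    let sub := matrix1_alt (rest.map (fun r => r.drop 1))
    fixed :: (rest.zip sub).map (fun p => p.1.take 1 ++ p.2)
termination_by array.length
decreasing_by simp

-- ===== PRECONDITION & SPEC =====
def Spec_matrix1 (array : List (List Int)) (out : List (List Int)) : Prop := out = matrix1_alt array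
instance (array : List (List Int)) (out : List (List Int)) : Decidable (Spec_matrix1 array out) := by unfold Spec_matrix1; infer_instance

-- ===== CLAIM (what is proved, stated in full; the proofs are below) =====
def Claim_equal_matrix1 : Prop := ∀ (array : List (List Int)), Dom_matrix1 array → Spec_matrix1 array (matrix1 array)

-- ===== LEMMAS AND PROOFS =====

theorem matrix1Row_gt (r : List Int) : ∀ i j : Nat, i < j → matrix1Row i j r = r := by
  induction r with
  | nil => intro i j _; rfl
  | cons x xs ih =>
      intro i j h
      simp only [matrix1Row]
      rw [if_neg (by simp; omega : ¬ ((i == j) = true)), ih i (j + 1) (by omega)]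

theorem matrix1Row_shift (r : List Int) : ∀ i j : Nat,
    matrix1Row (i + 1) (j + 1) r = matrix1Row i j r := by
  induction r with
  | nil => intro i j; rfl
  | cons x xs ih =>
      intro i j
      simp only [matrix1Row, ih]
      congr 1
      simp

-- a non-top row rebuilt by A = its first element re-attached to the rebuilt column-stripped tail
theorem matrix1Row_succ (r : List Int) (i : Nat) :
    matrix1Row (i + 1) 0 r = r.take 1 ++ matrix1Row i 0 (r.drop 1) := by
  cases r with
  | nil => rfl
  | cons x xs =>
      simp only [matrix1Row, List.take, List.drop, List.append]
      rw [if_neg (by simp : ¬ (((i + 1 : Nat) == 0) = true)), matrix1Row_shift]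
      simp

-- A's outer loop from index i+1 = zip-reattach over A's loop from i on the column-stripped rows
theorem matrix1Go_succ (rest : List (List Int)) : ∀ i : Nat,
    matrix1Go (i + 1) rest =
      (rest.zip (matrix1Go i (rest.map (fun r => r.drop 1)))).map (fun p => p.1.take 1 ++ p.2) := by
  induction rest with
  | nil => intro i; rfl
  | cons r rs ih =>
      intro i
      simp only [matrix1Go, List.map_cons, List.zip_cons_cons, List.map]
      rw [matrix1Row_succ r i, ih (i + 1)]

theorem matrix1_alt_eq_aux : ∀ (n : Nat) (array : List (List Int)), array.length ≤ n →
    matrix1_alt array = matrix1 array := by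
  intro n
  induction n with
  | zero =>
      intro array h
      have : array = [] := by cases array <;> simp_all
      subst this; rw [matrix1_alt.eq_def]; rfl
  | succ n ih =>
      intro array h
      cases array with
      | nil => rw [matrix1_alt.eq_def]; rfl
      | cons first rest =>
          rw [matrix1_alt.eq_def]
          simp only [matrix1, matrix1Go]
          rw [ih (rest.map (fun r => r.drop 1)) (by simp at h ⊢; omega)]
          simp only [matrix1]
          rw [matrix1Go_succ rest 0]
          congr 1
          cases first with
          | nil => rfl
          | cons x xs =>
              simp only [matrix1Row]
              rw [matrix1Row_gt xs 0 1 (by omega)]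
              rfl

-- ===== VERDICT (by name: the statement is the Claim_ definition above) =====
theorem matrix1_spec : Claim_equal_matrix1 := by
  intro array _
  unfold Spec_matrix1
  exact (matrix1_alt_eq_aux array.length array le_rfl).symm
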